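-- pv_equiv track=rewrite | github.com/MindaugasJ88/Python | Words_guessing_game.py | random_letters_func
-- ===== SOURCE A (Python) =====
-- def random_letters_func(rand_word, user_letter):
--     new_word = ""
--     duplicate = 0
--     for letter in rand_word:
--         if user_letter.lower() != letter.lower():
--             new_word += letter
--         else:
--             duplicate += 1
--             if duplicate > 1:
--                 new_word += letter
--     return new_word
-- ===== SOURCE B (Python) =====
-- def random_letters_func(rand_word, user_letter):
--     target = user_letter.lower()
--     for i, ch in enumerate(rand_word):
--         if ch.lower() == target:
--             return rand_word[:i] + rand_word[i + 1:]
--     return rand_word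
-- ===== Notes on version B (the rewrite author's own statement) =====
-- stated objective: faster
-- what changed: Replaced the accumulate-into-a-new-string pass with a duplicate counter by a find-first-matching-index-then-slice early return (no accumulator, no counter).
import Mathlib
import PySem

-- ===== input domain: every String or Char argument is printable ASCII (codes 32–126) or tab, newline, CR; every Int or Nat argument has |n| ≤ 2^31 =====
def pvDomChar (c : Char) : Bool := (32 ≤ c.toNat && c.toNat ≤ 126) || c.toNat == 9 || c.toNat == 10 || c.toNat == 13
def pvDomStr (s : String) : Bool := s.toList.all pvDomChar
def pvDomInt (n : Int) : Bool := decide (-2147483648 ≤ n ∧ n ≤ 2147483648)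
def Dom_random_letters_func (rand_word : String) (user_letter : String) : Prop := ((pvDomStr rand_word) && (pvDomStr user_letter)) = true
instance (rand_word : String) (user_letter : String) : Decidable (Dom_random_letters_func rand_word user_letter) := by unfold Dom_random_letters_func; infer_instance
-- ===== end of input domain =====

-- B drops the first case-insensitive match by find-index-then-slice instead of A's
-- rebuild-with-a-duplicate-counter pass; objective: faster (A rebuilds the string by repeated concatenation; B slices once).

-- ===== PORT A =====
-- A's for-loop over the word, carrying the accumulated new_word and the duplicate counter.
def pvALoop (ul : List Char) : List Char → List Char → Nat → List Char
  | [], newWord, _ => newWord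
  | letter :: rest, newWord, duplicate =>
    if ul ≠ PySem.Chars.lower [letter] then
      pvALoop ul rest (newWord ++ [letter]) duplicate
    else
      if duplicate + 1 > 1 then
        pvALoop ul rest (newWord ++ [letter]) (duplicate + 1)
      else
        pvALoop ul rest newWord (duplicate + 1)

def random_letters_func (rand_word : String) (user_letter : String) : String :=
  String.ofList (pvALoop (PySem.Chars.lower user_letter.toList) rand_word.toList [] 0)

-- ===== PORT B =====
-- B's enumerate loop: first index whose lowercased char equals the lowercased user_letter.
def pvFindIdx (target : List Char) : List Char → Nat → Option Nat
  | [], _ => none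
  | ch :: rest, i =>
    if PySem.Chars.lower [ch] = target then some i else pvFindIdx target rest (i + 1)

def random_letters_func_alt (rand_word : String) (user_letter : String) : String :=
  match pvFindIdx (PySem.Chars.lower user_letter.toList) rand_word.toList 0 with
  | some i => String.ofList (rand_word.toList.take i ++ rand_word.toList.drop (i + 1))
      -- rand_word[:i] + rand_word[i+1:] with 0 ≤ i < len: exactly take/drop
  | none => rand_word

-- ===== PRECONDITION & SPEC =====
def Spec_random_letters_func (rand_word : String) (user_letter : String) (out : String) : Prop := out = random_letters_func_alt rand_word user_letter
instance (rand_word : String) (user_letter : String) (out : String) : Decidable (Spec_random_letters_func rand_word user_letter out) := by unfold Spec_random_letters_func; infer_instance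

-- ===== CLAIM (what is proved, stated in full; the proofs are below) =====
def Claim_equal_random_letters_func : Prop := ∀ (rand_word : String) (user_letter : String), Dom_random_letters_func rand_word user_letter → Spec_random_letters_func rand_word user_letter (random_letters_func rand_word user_letter)

-- ===== LEMMAS AND PROOFS =====

-- Once duplicate ≥ 1 every remaining letter is appended, matching or not.
theorem pvALoop_after (ul : List Char) (l : List Char) :
    ∀ (acc : List Char) (d : Nat), 1 ≤ d → pvALoop ul l acc d = acc ++ l := by
  induction l with
  | nil => intro acc d _; simp [pvALoop]
  | cons c rest ih =>
    intro acc d hd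
    by_cases h : ul = PySem.Chars.lower [c]
    · have : ¬ (ul ≠ PySem.Chars.lower [c]) := by simpa using h
      simp only [pvALoop, if_neg this, if_pos (by omega : d + 1 > 1)]
      rw [ih _ _ (by omega)]; simp
    · simp only [pvALoop, if_pos h]
      rw [ih _ _ hd]; simp

-- Index shifting for B's search.
theorem pvFindIdx_shift (target : List Char) (l : List Char) :
    ∀ (i : Nat), pvFindIdx target l i = (pvFindIdx target l 0).map (· + i) := by
  induction l with
  | nil => intro i; simp [pvFindIdx]
  | cons c rest ih =>
    intro i
    by_cases h : PySem.Chars.lower [c] = target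
    · simp [pvFindIdx, h]
    · simp only [pvFindIdx, if_neg h]
      rw [ih (i + 1), ih 1]
      cases pvFindIdx target rest 0 <;> simp <;> omega

-- The core: A's loop from duplicate = 0 equals acc ++ (B's find-then-slice result).
theorem pvALoop_eq_slice (ul : List Char) (l : List Char) :
    ∀ (acc : List Char),
      pvALoop ul l acc 0 =
        acc ++ (match pvFindIdx ul l 0 with
                | some i => l.take i ++ l.drop (i + 1)
                | none => l) := by
  induction l with
  | nil => intro acc; simp [pvALoop, pvFindIdx]
  | cons c rest ih =>
    intro acc
    by_cases h : PySem.Chars.lower [c] = ul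
    · have hne : ¬ (ul ≠ PySem.Chars.lower [c]) := by simp [h.symm]
      simp only [pvALoop, if_neg hne, if_neg (by omega : ¬ (0 + 1 > 1))]
      rw [pvALoop_after ul rest acc 1 (by omega)]
      simp [pvFindIdx, h]
    · have hne : ul ≠ PySem.Chars.lower [c] := fun he => h he.symm
      simp only [pvALoop, if_pos hne, pvFindIdx, if_neg h]
      rw [ih (acc ++ [c]), pvFindIdx_shift ul rest 1]
      cases pvFindIdx ul rest 0 <;> simp

-- ===== VERDICT (by name: the statement is the Claim_ definition above) =====
theorem random_letters_func_spec : Claim_equal_random_letters_func := by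
  intro rand_word user_letter _
  unfold Spec_random_letters_func random_letters_func random_letters_func_alt
  rw [pvALoop_eq_slice]
  cases h : pvFindIdx (PySem.Chars.lower user_letter.toList) rand_word.toList 0 <;> simp [String.ofList_toList]
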